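-- pv_equiv track=rewrite | github.com/cypress777/oj | CoinPartitions.py | cal_ways
-- ===== SOURCE A (Python) =====
-- MM = 1000000
--
-- def cal_ways(n):
--     ways = [0] * (n + 1)
--     ways[0] = 1
--
--     for p in range(1, n + 1):
--         if p > n:
--             break
--         for i in range(p, n + 1):
--             ways[i] += ways[i - p]
--             ways[i] %= MM
--     return ways
-- ===== SOURCE B (Python) =====
-- MM = 1000000
--
-- def cal_ways(n):
--     # Pure rewrite of the DP: every pass builds a fresh row from the previous one,
--     # walking each residue class mod p with an explicit running prefix accumulator
--     # (the old row is only read; there is no in-place self-referential update).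
--     row = [0] * (n + 1)
--     row[0] = 1
--     for p in range(1, n + 1):
--         new = [0] * (n + 1)
--         for res in range(p):
--             acc = 0
--             i = res
--             while i <= n:
--                 acc = (acc + row[i]) % MM
--                 new[i] = acc
--                 i += p
--         row = new
--     return row
-- ===== Notes on version B (the rewrite author's own statement) =====
-- stated objective: alternative
-- what changed: A's in-place coin DP (ways[i] += ways[i-p] reading the row being mutated) is replaced by a pure rewrite: each pass builds a fresh row from the previous one, walking each residue class mod p with an explicit running prefix accumulator, so the update never reads its own output.
import Mathlib
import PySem

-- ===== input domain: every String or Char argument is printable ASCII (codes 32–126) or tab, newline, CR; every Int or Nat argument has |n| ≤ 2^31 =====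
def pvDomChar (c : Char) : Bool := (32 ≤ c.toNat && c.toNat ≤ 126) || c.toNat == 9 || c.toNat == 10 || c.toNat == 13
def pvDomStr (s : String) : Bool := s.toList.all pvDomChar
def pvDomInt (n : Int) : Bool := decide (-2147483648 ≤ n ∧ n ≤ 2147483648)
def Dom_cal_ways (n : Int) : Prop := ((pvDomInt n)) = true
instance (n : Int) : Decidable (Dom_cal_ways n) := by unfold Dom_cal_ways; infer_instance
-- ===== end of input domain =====

-- B replaces A's in-place self-referential coin DP sweep by a pure rewrite: each pass
-- builds a fresh row from the previous one, walking each residue class mod p with an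
-- explicit running prefix accumulator ('alternative', not claimed faster). Both ports
-- keep the Python list as a Lean Array (O(1) access, like a Python list); all indices
-- touched are provably nonnegative and in range under Pre_, so .toNat / setIfInBounds /
-- getD are exact there.

-- ===== PORT A =====
-- inner loop body: ways[i] += ways[i - p]; ways[i] %= MM   (i ≥ p ≥ 1, i ≤ n: in range)
def aInnerStep (p : Int) (w : Array Int) (i : Int) : Array Int :=
  let w := w.setIfInBounds i.toNat (w.getD i.toNat 0 + w.getD (i - p).toNat 0)
  w.setIfInBounds i.toNat (PySem.Int.mod (w.getD i.toNat 0) 1000000)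

-- outer loop body; the Bool records whether 'break' has fired
def aOuterStep (n : Int) (st : Bool × Array Int) (p : Int) : Bool × Array Int :=
  if st.1 then st
  else if p > n then (true, st.2)
  else (false, (PySem.List.pyRange p (n + 1)).foldl (aInnerStep p) st.2)

def cal_ways (n : Int) : List Int :=
  let ways := (PySem.List.pyRepeat [(0 : Int)] (n + 1)).toArray
  let ways := ways.setIfInBounds 0 1   -- ways[0] = 1 (in range for every n with 0 ≤ n)
  ((PySem.List.pyRange 1 (n + 1)).foldl (aOuterStep n) (false, ways)).2.toList

-- ===== PORT B =====
-- while i <= n: acc = (acc + row[i]) % MM; new[i] = acc; i += p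
-- (the conjunct 0 < p only makes the recursion total; the program always has p ≥ 1)
def bWhile (row : Array Int) (n p acc : Int) (nw : Array Int) (i : Int) : Array Int :=
  if _h : i ≤ n ∧ 0 < p then
    let acc := PySem.Int.mod (acc + row.getD i.toNat 0) 1000000
    bWhile row n p acc (nw.setIfInBounds i.toNat acc) (i + p)
  else nw
termination_by (n + 1 - i).toNat
decreasing_by omega

-- new = [0] * (n + 1); for res in range(p): acc = 0; i = res; while ...
def bOuterStep (n : Int) (row : Array Int) (p : Int) : Array Int :=
  (PySem.List.pyRange 0 p).foldl (fun nw res => bWhile row n p 0 nw res)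
    ((PySem.List.pyRepeat [(0 : Int)] (n + 1)).toArray)

def cal_ways_alt (n : Int) : List Int :=
  let row := (PySem.List.pyRepeat [(0 : Int)] (n + 1)).toArray
  let row := row.setIfInBounds 0 1   -- row[0] = 1 (raises in Python iff n < 0, outside Pre_)
  ((PySem.List.pyRange 1 (n + 1)).foldl (bOuterStep n) row).toList

-- ===== PRECONDITION & SPEC =====
-- Pre_ excludes n < 0, where both A and B raise IndexError ([0] = 1 on an empty list).
def Pre_cal_ways (n : Int) : Prop := 0 ≤ n
instance (n : Int) : Decidable (Pre_cal_ways n) := by unfold Pre_cal_ways; infer_instance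
def pvWitness_cal_ways : Int := 3

def Spec_cal_ways (n : Int) (out : List Int) : Prop := out = cal_ways_alt n
instance (n : Int) (out : List Int) : Decidable (Spec_cal_ways n out) := by unfold Spec_cal_ways; infer_instance

-- ===== CLAIM (what is proved, stated in full; the proofs are below) =====
def Claim_equal_cal_ways : Prop := ∀ (n : Int), Dom_cal_ways n → Pre_cal_ways n → Spec_cal_ways n (cal_ways n)

-- ===== LEMMAS AND PROOFS =====

-- Array.getD of a setIfInBounds, at Nat indices
theorem agetD_set (xs : Array Int) (i k : Nat) (v : Int) (hi : i < xs.size) :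
    (xs.setIfInBounds i v).getD k 0 = if k = i then v else xs.getD k 0 := by
  rw [Array.getD_eq_getD_getElem?, Array.getD_eq_getD_getElem?, Array.getElem?_setIfInBounds]
  by_cases hk : i = k
  · subst hk; simp [hi]
  · rw [if_neg hk, if_neg (fun h => hk h.symm)]

theorem agetD_toList (xs : Array Int) (k : Nat) : xs.getD k 0 = xs.toList.getD k 0 := by
  rw [Array.getD_eq_getD_getElem?, List.getD_eq_getElem?_getD, Array.getElem?_toList]

theorem agetD_eq_getElem (xs : Array Int) (k : Nat) (h : k < xs.size) :
    xs.getD k 0 = xs[k] := (Array.getElem_eq_getD 0).symm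

-- the common recurrence both loops compute over the current row r
def sVal (r : Array Int) (p k : Nat) : Int :=
  if p = 0 ∨ k < p then r.getD k 0
  else (r.getD k 0 + sVal r p (k - p)) % 1000000
termination_by k
decreasing_by omega

-- every entry (and the getD default) lies in [0, 10^6)
def Bnd (r : Array Int) : Prop := ∀ k : Nat, 0 ≤ r.getD k 0 ∧ r.getD k 0 < 1000000

theorem sVal_bnd (r : Array Int) (p k : Nat) (hr : Bnd r) :
    0 ≤ sVal r p k ∧ sVal r p k < 1000000 := by
  unfold sVal
  split
  · exact hr k
  · exact ⟨Int.emod_nonneg _ (by norm_num), Int.emod_lt_of_pos _ (by norm_num)⟩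

-- A's inner loop, characterised: index k becomes sVal r p k once the sweep has passed it
theorem aInner_spec (r : Array Int) (p : Nat) (hp : 0 < p) (m : Nat) (hpm : p ≤ m)
    (hmL : m ≤ r.size) :
    (((PySem.List.pyRange (p:Int) (m:Int)).foldl (aInnerStep (p:Int)) r).size = r.size) ∧
    (∀ k : Nat, ((PySem.List.pyRange (p:Int) (m:Int)).foldl (aInnerStep (p:Int)) r).getD k 0
        = if k < m then sVal r p k else r.getD k 0) := by
  induction m, hpm using Nat.le_induction with
  | base =>
      rw [PySem.List.pyRange_one_eq_nil (le_refl _)]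
      refine ⟨rfl, fun k => ?_⟩
      simp only [List.foldl_nil]
      split
      · rw [sVal]
        simp only [if_pos (Or.inr ‹k < p›)]
      · rfl
  | succ m hpm ih =>
      have hmL' : m ≤ r.size := by omega
      obtain ⟨ihlen, ihval⟩ := ih hmL'
      have hcast : ((m + 1 : Nat) : Int) = (m : Int) + 1 := by push_cast; ring
      rw [hcast, PySem.List.pyRange_one_succ_right (by exact_mod_cast hpm), List.foldl_append,
        List.foldl_cons, List.foldl_nil]
      set mid := (PySem.List.pyRange (p:Int) (m:Int)).foldl (aInnerStep (p:Int)) r with hmid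
      have hmlen : m < mid.size := by omega
      have htn1 : ((m : Int)).toNat = m := Int.toNat_natCast m
      have htn2 : ((m : Int) - (p : Int)).toNat = m - p := by omega
      have hread1 : mid.getD m 0 = r.getD m 0 := by
        rw [ihval m]; simp
      have hread2 : mid.getD (m - p) 0 = sVal r p (m - p) := by
        rw [ihval (m - p), if_pos (by omega)]
      unfold aInnerStep
      simp only [htn1, htn2, hread1, hread2]
      set v1 := r.getD m 0 + sVal r p (m - p) with hv1
      have hget1 : (mid.setIfInBounds m v1).getD m 0 = v1 := by
        rw [agetD_set mid m m v1 hmlen, if_pos rfl]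
      rw [hget1]
      constructor
      · rw [Array.size_setIfInBounds, Array.size_setIfInBounds, ihlen]
      · intro k
        rw [agetD_set _ m k _ (by rw [Array.size_setIfInBounds]; exact hmlen)]
        by_cases hk : k = m
        · subst hk
          rw [if_pos rfl, if_pos (by omega)]
          rw [PySem.Int.mod_eq_emod_of_pos (by norm_num)]
          rw [sVal]
          rw [if_neg (by omega)]
        · rw [if_neg hk, agetD_set mid m k v1 hmlen, if_neg hk, ihval k]
          split <;> split <;> first | rfl | omega

-- B's chain walk, characterised: it writes sVal at every index of the residue chain
-- {ki, ki + p, ...} ∩ [0, n] and leaves everything else untouched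
theorem bWhile_spec (r : Array Int) (p : Nat) (hp : 0 < p) (hr : Bnd r) (n : Int)
    (hn : 0 ≤ n) :
    ∀ (d ki : Nat) (nw : Array Int) (acc : Int), d = n.toNat + 1 - ki →
      nw.size = n.toNat + 1 →
      acc = (if ki < p then 0 else sVal r p (ki - p)) →
      ((bWhile r n (p : Int) acc nw (ki : Int)).size = n.toNat + 1) ∧
      (∀ k : Nat, k ≤ n.toNat → (∃ j : Nat, k = ki + j * p) →
        (bWhile r n (p : Int) acc nw (ki : Int)).getD k 0 = sVal r p k) ∧
      (∀ k : Nat, (n.toNat < k ∨ ¬ ∃ j : Nat, k = ki + j * p) →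
        (bWhile r n (p : Int) acc nw (ki : Int)).getD k 0 = nw.getD k 0) := by
  intro d
  induction d using Nat.strong_induction_on with
  | _ d ih =>
    intro ki nw acc hd hsize hacc
    by_cases hki : (ki : Int) ≤ n
    · have hkiN : ki ≤ n.toNat := by omega
      rw [bWhile, dif_pos ⟨hki, by exact_mod_cast hp⟩]
      have htn : ((ki : Int)).toNat = ki := Int.toNat_natCast ki
      have hacc' : PySem.Int.mod (acc + r.getD ((ki : Int)).toNat 0) 1000000 = sVal r p ki := by
        rw [htn, PySem.Int.mod_eq_emod_of_pos (by norm_num), hacc]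
        by_cases hlt : ki < p
        · rw [if_pos hlt, zero_add, sVal, if_pos (Or.inr hlt)]
          have := hr ki
          omega
        · rw [if_neg hlt]
          have hs : sVal r p ki = (r.getD ki 0 + sVal r p (ki - p)) % 1000000 := by
            rw [sVal, if_neg (by omega)]
          rw [hs, add_comm]
      rw [hacc']
      have hcast : (ki : Int) + (p : Int) = ((ki + p : Nat) : Int) := by push_cast; ring
      rw [hcast]
      have hrec := ih (n.toNat + 1 - (ki + p)) (by omega) (ki + p)
        (nw.setIfInBounds ((ki : Int)).toNat (sVal r p ki)) (sVal r p ki) rfl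
        (by rw [Array.size_setIfInBounds]; exact hsize)
        (by rw [if_neg (by omega)]; congr 1; omega)
      obtain ⟨hrs, hrcov, hrrest⟩ := hrec
      have hset : ∀ k : Nat, (nw.setIfInBounds ((ki : Int)).toNat (sVal r p ki)).getD k 0
          = if k = ki then sVal r p ki else nw.getD k 0 := by
        intro k
        rw [htn]
        exact agetD_set nw ki k _ (by omega)
      refine ⟨hrs, ?_, ?_⟩
      · intro k hkN ⟨j, hj⟩
        cases j with
        | zero =>
            have hkki : k = ki := by omega
            rw [hrrest k (Or.inr ?_), hset k, if_pos hkki, hkki]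
            rintro ⟨j', hj'⟩
            have : j' * p ≥ 0 := Nat.zero_le _
            omega
        | succ j =>
            apply hrcov k hkN
            exact ⟨j, by rw [hj]; ring⟩
      · intro k hk
        rcases hk with hk | hk
        · rw [hrrest k (Or.inl hk), hset k, if_neg (by omega)]
        · have hnot' : ¬ ∃ j : Nat, k = (ki + p) + j * p := by
            rintro ⟨j', hj'⟩
            exact hk ⟨j' + 1, by rw [hj']; ring⟩
          rw [hrrest k (Or.inr hnot'), hset k, if_neg (by
            intro hkk
            exact hk ⟨0, by omega⟩)]
    · rw [bWhile, dif_neg (by intro h; exact hki h.1)]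
      refine ⟨hsize, ?_, fun _ _ => rfl⟩
      intro k hkN ⟨j, hj⟩
      have : j * p ≥ 0 := Nat.zero_le _
      omega

-- the residue loop, accumulated: after residues [0, res) every index k ≤ n with
-- k % p < res holds sVal, the rest is still 0
theorem bRes_spec (r : Array Int) (p : Nat) (hp : 0 < p) (hr : Bnd r) (n : Int)
    (hn : 0 ≤ n) :
    ∀ res : Nat, res ≤ p →
      (((PySem.List.pyRange 0 (res : Int)).foldl (fun nw q => bWhile r n (p : Int) 0 nw q)
          ((PySem.List.pyRepeat [(0 : Int)] (n + 1)).toArray)).size = n.toNat + 1) ∧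
      (∀ k : Nat, k ≤ n.toNat → k % p < res →
        ((PySem.List.pyRange 0 (res : Int)).foldl (fun nw q => bWhile r n (p : Int) 0 nw q)
          ((PySem.List.pyRepeat [(0 : Int)] (n + 1)).toArray)).getD k 0 = sVal r p k) ∧
      (∀ k : Nat, (n.toNat < k ∨ res ≤ k % p) →
        ((PySem.List.pyRange 0 (res : Int)).foldl (fun nw q => bWhile r n (p : Int) 0 nw q)
          ((PySem.List.pyRepeat [(0 : Int)] (n + 1)).toArray)).getD k 0 = 0) := by
  intro res
  induction res with
  | zero =>
      intro _
      rw [show ((0 : Nat) : Int) = 0 by norm_num, PySem.List.pyRange_one_eq_nil (le_refl 0)]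
      simp only [List.foldl_nil]
      refine ⟨?_, fun k _ h => by omega, fun k _ => ?_⟩
      · rw [List.size_toArray, PySem.List.pyRepeat_singleton, List.length_replicate]; omega
      · rw [agetD_toList, List.toList_toArray, PySem.List.pyRepeat_singleton]
        by_cases hk : k < (n + 1).toNat
        · rw [List.getD_eq_getElem _ 0 (by simpa using hk), List.getElem_replicate]
        · rw [List.getD_eq_default _ 0 (by simpa using hk)]
  | succ res ihres =>
      intro hres
      obtain ⟨ihs, ihcov, ihrest⟩ := ihres (by omega)
      have hcast : ((res + 1 : Nat) : Int) = (res : Int) + 1 := by push_cast; ring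
      rw [hcast, PySem.List.pyRange_one_succ_right (by positivity), List.foldl_append,
        List.foldl_cons, List.foldl_nil]
      set prev := (PySem.List.pyRange 0 (res : Int)).foldl
        (fun nw q => bWhile r n (p : Int) 0 nw q)
        ((PySem.List.pyRepeat [(0 : Int)] (n + 1)).toArray) with hprev
      have hw := bWhile_spec r p hp hr n hn (n.toNat + 1 - res) res prev 0 rfl ihs
        (by rw [if_pos (by omega)])
      obtain ⟨hws, hwcov, hwrest⟩ := hw
      refine ⟨hws, ?_, ?_⟩
      · intro k hkN hkm
        by_cases hkr : k % p = res
        · apply hwcov k hkN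
          refine ⟨k / p, ?_⟩
          have h1 := Nat.mod_add_div k p
          have h2 : p * (k / p) = (k / p) * p := Nat.mul_comm _ _
          omega
        · rw [hwrest k (Or.inr ?_), ihcov k hkN (by omega)]
          rintro ⟨j, hj⟩
          apply hkr
          rw [hj, Nat.add_mul_mod_self_right, Nat.mod_eq_of_lt (by omega)]
      · intro k hk
        rcases hk with hk | hk
        · rw [hwrest k (Or.inl hk), ihrest k (Or.inl hk)]
        · have hkr : k % p ≠ res := by omega
          rw [hwrest k (Or.inr ?_), ihrest k (Or.inr (by omega))]
          rintro ⟨j, hj⟩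
          apply hkr
          rw [hj, Nat.add_mul_mod_self_right, Nat.mod_eq_of_lt (by omega)]

theorem size_bOuterStep (n : Int) (hn : 0 ≤ n) (r : Array Int) (hr : Bnd r) (p : Int)
    (hp1 : 1 ≤ p) : (bOuterStep n r p).size = n.toNat + 1 := by
  have hpcast : p = ((p.toNat : Nat) : Int) := by omega
  unfold bOuterStep
  rw [hpcast]
  exact (bRes_spec r p.toNat (by omega) hr n hn p.toNat (le_refl _)).1

theorem getD_bOuterStep (n : Int) (hn : 0 ≤ n) (r : Array Int) (hr : Bnd r) (p : Int)
    (hp1 : 1 ≤ p) (k : Nat) (hk : k ≤ n.toNat) :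
    (bOuterStep n r p).getD k 0 = sVal r p.toNat k := by
  have hpcast : p = ((p.toNat : Nat) : Int) := by omega
  unfold bOuterStep
  rw [hpcast]
  exact (bRes_spec r p.toNat (by omega) hr n hn p.toNat (le_refl _)).2.1 k hk
    (Nat.mod_lt k (by omega))

-- one pass: A's in-place sweep produces exactly B's fresh row
theorem onestep (n : Int) (hn : 0 ≤ n) (r : Array Int) (hlen : r.size = n.toNat + 1)
    (hr : Bnd r) (p : Int) (hp1 : 1 ≤ p) (hpn : p ≤ n) :
    (PySem.List.pyRange p (n + 1)).foldl (aInnerStep p) r = bOuterStep n r p := by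
  have hpcast : p = ((p.toNat : Nat) : Int) := by omega
  have hLcast : n + 1 = ((n.toNat + 1 : Nat) : Int) := by omega
  have hp0 : 0 < p.toNat := by omega
  have hpm : p.toNat ≤ n.toNat + 1 := by omega
  have hB := size_bOuterStep n hn r hr p hp1
  have hBval := getD_bOuterStep n hn r hr p hp1
  rw [hpcast, hLcast]
  have hA := aInner_spec r p.toNat hp0 (n.toNat + 1) hpm (by omega)
  obtain ⟨hAlen, hAval⟩ := hA
  rw [hpcast] at hB hBval
  apply Array.ext
  · rw [hAlen, hB]; omega
  · intro k hk1 hk2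
    have hkL : k < n.toNat + 1 := by rw [hAlen, hlen] at hk1; exact hk1
    rw [← agetD_eq_getElem _ k hk1, hAval k, if_pos hkL,
      ← agetD_eq_getElem _ k hk2, hBval k (by omega)]
    rw [Int.toNat_natCast]

theorem bnd_bOuterStep (n : Int) (hn : 0 ≤ n) (r : Array Int) (hr : Bnd r) (p : Int)
    (hp1 : 1 ≤ p) : Bnd (bOuterStep n r p) := by
  intro k
  by_cases hk : k ≤ n.toNat
  · rw [getD_bOuterStep n hn r hr p hp1 k hk]
    exact sVal_bnd r p.toNat k hr
  · have hpcast : p = ((p.toNat : Nat) : Int) := by omega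
    unfold bOuterStep
    rw [hpcast, (bRes_spec r p.toNat (by omega) hr n hn p.toNat (le_refl _)).2.2 k
      (Or.inl (by omega))]
    norm_num

-- the outer loops agree step by step ('break' never fires: every p of the range is ≤ n)
theorem outer_spec (n : Int) (hn : 0 ≤ n) (l : List Int) (hl : ∀ p ∈ l, 1 ≤ p ∧ p ≤ n) :
    ∀ r : Array Int, r.size = n.toNat + 1 → Bnd r →
      l.foldl (aOuterStep n) (false, r) = (false, l.foldl (bOuterStep n) r) := by
  induction l with
  | nil => intro r _ _; rfl
  | cons p l ih =>
      intro r hlen hr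
      obtain ⟨hp1, hpn⟩ := hl p (List.mem_cons_self)
      have hstep : aOuterStep n (false, r) p = (false, bOuterStep n r p) := by
        unfold aOuterStep
        dsimp only
        rw [if_neg (by decide : ¬ (false = true)), if_neg (by omega : ¬ p > n)]
        rw [onestep n hn r hlen hr p hp1 hpn]
      rw [List.foldl_cons, List.foldl_cons, hstep]
      exact ih (fun q hq => hl q (List.mem_cons_of_mem p hq)) (bOuterStep n r p)
        (size_bOuterStep n hn r hr p hp1) (bnd_bOuterStep n hn r hr p hp1)

theorem bnd_init (n : Int) (hn : 0 ≤ n) :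
    Bnd ((PySem.List.pyRepeat [(0 : Int)] (n + 1)).toArray.setIfInBounds 0 1) := by
  intro k
  rw [agetD_toList, Array.toList_setIfInBounds, List.toList_toArray,
    PySem.List.pyRepeat_singleton]
  have h1 : (n + 1).toNat = n.toNat + 1 := by omega
  rw [h1, List.replicate_succ]
  cases k with
  | zero => norm_num
  | succ k =>
      rw [List.set_cons_zero, List.getD_cons_succ]
      by_cases hk : k < n.toNat
      · rw [List.getD_eq_getElem _ 0 (by simpa using hk), List.getElem_replicate]
        norm_num
      · rw [List.getD_eq_default _ 0 (by simpa using hk)]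
        norm_num

-- ===== VERDICT (by name: the statement is the Claim_ definition above) =====
theorem cal_ways_spec : Claim_equal_cal_ways := by
  intro n _ hn
  have hn0 : (0:Int) ≤ n := hn
  unfold Spec_cal_ways
  show ((PySem.List.pyRange 1 (n + 1)).foldl (aOuterStep n)
      (false, (PySem.List.pyRepeat [(0 : Int)] (n + 1)).toArray.setIfInBounds 0 1)).2.toList
    = ((PySem.List.pyRange 1 (n + 1)).foldl (bOuterStep n)
      ((PySem.List.pyRepeat [(0 : Int)] (n + 1)).toArray.setIfInBounds 0 1)).toList
  rw [outer_spec n hn0 _ (fun p hp => by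
        have := PySem.List.mem_pyRange_one.mp hp; omega)
      _ (by simp [PySem.List.pyRepeat_singleton]; omega)
      (bnd_init n hn0)]
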